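-- pv_equiv track=rewrite | github.com/CostaLab/practical_SS2015 | algorithms/src/kmer_dict.py | getBitArray
-- ===== SOURCE A (Python) =====
-- def getBitArray(key):
--     bitarray = 0
--     for i, c in enumerate(key):
--         bitarray = bitarray << 3
--         if c == 'A':
--             bitarray += 0
--         elif c == 'C':
--             bitarray += 1
--         elif c == 'G':
--             bitarray += 2
--         elif c == 'T':
--             bitarray += 3
--         elif c == 'N':
--             bitarray += 4
--     return bitarray
-- ===== SOURCE B (Python) =====
-- _VAL = {'A': 0, 'C': 1, 'G': 2, 'T': 3, 'N': 4}
--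
-- def getBitArray(key):
--     # Divide and conquer: encode each half, combine by shifting the left half
--     # past the right half's 3-bit slots.
--     if len(key) <= 1:
--         return _VAL.get(key, 0) if key else 0
--     m = len(key) // 2
--     return (getBitArray(key[:m]) << (3 * (len(key) - m))) + getBitArray(key[m:])
-- ===== Notes on version B (the rewrite author's own statement) =====
-- stated objective: alternative
-- what changed: Replaces A's linear left-to-right Horner shift-accumulate loop with a divide-and-conquer recursion: the key is split at the midpoint, each half is encoded recursively, and the halves are combined by shifting the left result past the right half's 3-bit slots.
import Mathlib
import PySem

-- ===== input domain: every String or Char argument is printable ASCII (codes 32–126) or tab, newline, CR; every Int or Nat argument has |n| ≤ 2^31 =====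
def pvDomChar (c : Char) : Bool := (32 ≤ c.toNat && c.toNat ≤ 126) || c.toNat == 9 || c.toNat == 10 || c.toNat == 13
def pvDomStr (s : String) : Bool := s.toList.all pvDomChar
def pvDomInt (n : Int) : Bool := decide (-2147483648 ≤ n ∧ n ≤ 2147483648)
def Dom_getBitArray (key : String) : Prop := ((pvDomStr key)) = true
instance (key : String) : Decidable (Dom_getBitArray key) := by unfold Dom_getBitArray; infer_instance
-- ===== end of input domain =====

-- B replaces A's linear Horner shift-accumulate loop with a divide-and-conquer
-- recursion on halves of the key; same result, different algorithm (objective: alternative).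

-- ===== PORT A =====
-- A's loop body: shift accumulator left 3 bits ('<< 3' on Python ints is exactly *8), if-chain adds the code.
def aStep (bitarray : Int) (c : Char) : Int :=
  let bitarray := bitarray * 8
  if c = 'A' then bitarray + 0
  else if c = 'C' then bitarray + 1
  else if c = 'G' then bitarray + 2
  else if c = 'T' then bitarray + 3
  else if c = 'N' then bitarray + 4
  else bitarray

def getBitArray (key : String) : Int :=
  key.toList.foldl aStep 0

-- ===== PORT B =====
-- B: _VAL.get(c, 0) on the literal dict (a one-char string key in Python ≙ the char here).
def kmerVal (c : Char) : Int :=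
  (PySem.Dict.ofList [('A', (0 : Int)), ('C', 1), ('G', 2), ('T', 3), ('N', 4)]).getD c 0

-- B's recursion: split at the midpoint, encode halves, shift left half past the
-- right half's slots ('<< 3*(len-m)' with a nonnegative shift is exactly * 2^(3*(len-m))).
def encHalves (l : List Char) : Int :=
  if l.length ≤ 1 then
    match l with
    | [] => 0
    | c :: _ => kmerVal c
  else
    let m := l.length / 2
    encHalves (l.take m) * 2 ^ (3 * (l.length - m)) + encHalves (l.drop m)
termination_by l.length
decreasing_by
  · simp only [List.length_take]; omega
  · simp only [List.length_drop]; omega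

def getBitArray_alt (key : String) : Int :=
  encHalves key.toList

-- ===== PRECONDITION & SPEC =====
def Spec_getBitArray (key : String) (out : Int) : Prop := out = getBitArray_alt key
instance (key : String) (out : Int) : Decidable (Spec_getBitArray key out) := by unfold Spec_getBitArray; infer_instance

-- ===== CLAIM (what is proved, stated in full; the proofs are below) =====
def Claim_equal_getBitArray : Prop := ∀ (key : String), Dom_getBitArray key → Spec_getBitArray key (getBitArray key)

-- ===== LEMMAS AND PROOFS =====

lemma kmerVal_other (c : Char) (h1 : c ≠ 'A') (h2 : c ≠ 'C') (h3 : c ≠ 'G')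
    (h4 : c ≠ 'T') (h5 : c ≠ 'N') : kmerVal c = 0 := by
  have hD : (PySem.Dict.ofList [('A', (0 : Int)), ('C', 1), ('G', 2), ('T', 3), ('N', 4)])
      = PySem.Dict.mk [('A', 0), ('C', 1), ('G', 2), ('T', 3), ('N', 4)] := by decide
  have b1 : ('A' == c) = false := by simp [Ne.symm h1]
  have b2 : ('C' == c) = false := by simp [Ne.symm h2]
  have b3 : ('G' == c) = false := by simp [Ne.symm h3]
  have b4 : ('T' == c) = false := by simp [Ne.symm h4]
  have b5 : ('N' == c) = false := by simp [Ne.symm h5]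
  unfold kmerVal
  rw [hD]
  simp [PySem.Dict.getD, PySem.Dict.get?, List.find?, b1, b2, b3, b4, b5]

lemma aStep_eq (b : Int) (c : Char) : aStep b c = b * 8 + kmerVal c := by
  unfold aStep
  by_cases h1 : c = 'A'
  · subst h1; simp [show kmerVal 'A' = 0 from by decide]
  by_cases h2 : c = 'C'
  · subst h2; simp [h1, show kmerVal 'C' = 1 from by decide]
  by_cases h3 : c = 'G'
  · subst h3; simp [h1, h2, show kmerVal 'G' = 2 from by decide]
  by_cases h4 : c = 'T'
  · subst h4; simp [h1, h2, h3, show kmerVal 'T' = 3 from by decide]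
  by_cases h5 : c = 'N'
  · subst h5; simp [h1, h2, h3, h4, show kmerVal 'N' = 4 from by decide]
  simp [h1, h2, h3, h4, h5, kmerVal_other c h1 h2 h3 h4 h5]

-- Horner fold with accumulator a equals a·8^n plus the fold from 0.
lemma aFold_acc (l : List Char) (a : Int) :
    l.foldl aStep a = a * 8 ^ l.length + l.foldl aStep 0 := by
  induction l generalizing a with
  | nil => simp
  | cons c cs ih =>
    simp only [List.foldl_cons, List.length_cons]
    rw [ih (aStep a c), ih (aStep 0 c), aStep_eq, aStep_eq]
    ring

-- A's fold splits over a concatenation (combine lemma matching B's structure).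
lemma aFold_append (l1 l2 : List Char) :
    (l1 ++ l2).foldl aStep 0
      = (l1.foldl aStep 0) * 8 ^ l2.length + l2.foldl aStep 0 := by
  rw [List.foldl_append, aFold_acc]

-- B's divide-and-conquer recursion computes the same value as A's fold.
lemma encHalves_eq : ∀ (n : Nat) (l : List Char), l.length ≤ n →
    encHalves l = l.foldl aStep 0 := by
  intro n
  induction n with
  | zero =>
    intro l h
    have : l = [] := List.length_eq_zero_iff.mp (Nat.le_zero.mp h)
    subst this; rw [encHalves.eq_def]; simp
  | succ n ih =>
    intro l h
    rw [encHalves.eq_def]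
    by_cases h1 : l.length ≤ 1
    · match l, h1 with
      | [], _ => simp
      | [c], _ => simp [aStep_eq]
    · simp only [h1, if_false]
      have hlen2 : 2 ≤ l.length := by omega
      set m := l.length / 2 with hm
      have hmlt : m < l.length := by omega
      have hm1 : 1 ≤ m := by omega
      have htake : (l.take m).length = m := by simp [List.length_take]; omega
      have hdrop : (l.drop m).length = l.length - m := by simp [List.length_drop]
      rw [ih (l.take m) (by omega), ih (l.drop m) (by omega)]
      have hsplit := aFold_append (l.take m) (l.drop m)
      rw [List.take_append_drop] at hsplit
      rw [hsplit, hdrop]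
      have : (2 : Int) ^ (3 * (l.length - m)) = 8 ^ (l.length - m) := by
        rw [pow_mul]; norm_num
      rw [this]

-- ===== VERDICT (by name: the statement is the Claim_ definition above) =====
theorem getBitArray_spec : Claim_equal_getBitArray := by
  intro key _
  unfold Spec_getBitArray getBitArray getBitArray_alt
  exact (encHalves_eq key.toList.length key.toList le_rfl).symm
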